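-- pv_equiv track=rewrite | github.com/UAmsterdam/IR | due_diligence/Baseline_code_for_all_topics.py | convert_labels_to_spans
-- ===== SOURCE A (Python) =====
-- def convert_labels_to_spans(y_pred):
--     start, spans = 0, []
--     in_span = False
--     for pos, label in enumerate(y_pred):
--         if label == "1" and not in_span:
--             start = pos
--             in_span = True
--         elif label != "1" and in_span:
--             spans.append((start, pos - 1))
--             in_span = False
--     if in_span:
--         spans.append((start, len(y_pred) - 1))
--     return spans
-- ===== SOURCE B (Python) =====
-- def convert_labels_to_spans(y_pred):
--     spans, i, n = [], 0, len(y_pred)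
--     while i < n:
--         j = i + 1
--         while j < n and y_pred[j] == y_pred[i]:
--             j += 1
--         if y_pred[i] == "1":
--             spans.append((i, j - 1))
--         i = j
--     return spans
-- ===== Notes on version B (the rewrite author's own statement) =====
-- stated objective: alternative
-- what changed: Replaces A's in_span/start boolean state machine over single labels with a run-grouping two-pointer scan: each maximal run of equal labels is measured at once and emitted as a span when its label is '1'.
import Mathlib
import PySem

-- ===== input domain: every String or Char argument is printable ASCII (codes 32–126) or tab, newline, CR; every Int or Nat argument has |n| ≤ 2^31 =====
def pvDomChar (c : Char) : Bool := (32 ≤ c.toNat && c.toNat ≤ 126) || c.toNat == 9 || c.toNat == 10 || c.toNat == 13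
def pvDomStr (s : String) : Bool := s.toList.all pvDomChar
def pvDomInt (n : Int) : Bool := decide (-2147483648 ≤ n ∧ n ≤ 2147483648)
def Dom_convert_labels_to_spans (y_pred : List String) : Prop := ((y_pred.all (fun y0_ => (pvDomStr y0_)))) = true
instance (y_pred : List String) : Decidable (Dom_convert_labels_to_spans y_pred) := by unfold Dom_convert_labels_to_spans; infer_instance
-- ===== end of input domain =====

-- B replaces A's in_span/start state machine with a run-grouping two-pointer scan (alternative decomposition, same cost).

-- ===== PORT A =====
-- A's for-loop over enumerate(y_pred) with state (start, spans, in_span), then the trailing append.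
def pvALoop (start : Int) (spans : List (Int × Int)) (inSpan : Bool) (pos : Int) :
    List String → Int × List (Int × Int) × Bool
  | [] => (start, spans, inSpan)
  | l :: ls =>
    if l == "1" && !inSpan then pvALoop pos spans true (pos + 1) ls
    else if l != "1" && inSpan then pvALoop start (spans ++ [(start, pos - 1)]) false (pos + 1) ls
    else pvALoop start spans inSpan (pos + 1) ls

def convert_labels_to_spans (y_pred : List String) : List (Int × Int) :=
  let r := pvALoop 0 [] false 0 y_pred
  if r.2.2 then r.2.1 ++ [(r.1, (y_pred.length : Int) - 1)] else r.2.1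

-- ===== PORT B =====
-- Source B's inner while: count the elements following the run head that equal it, return (count, rest).
def pvRun (x : String) : List String → Nat × List String
  | [] => (0, [])
  | y :: ys => if y == x then ((pvRun x ys).1 + 1, (pvRun x ys).2) else (0, y :: ys)

theorem pvRun_len (x : String) (xs : List String) : (pvRun x xs).2.length ≤ xs.length := by
  induction xs with
  | nil => simp [pvRun]
  | cons y ys ih => by_cases h : (y == x) = true <;> simp [pvRun, h] <;> omega

-- Source B's outer while: process one maximal run per step; pos is the run's start index.
def pvBGo (pos : Int) : List String → List (Int × Int)
  | [] => []
  | x :: xs =>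
    (if x == "1" then [(pos, pos + ((pvRun x xs).1 : Int))] else []) ++
      pvBGo (pos + ((pvRun x xs).1 : Int) + 1) (pvRun x xs).2
termination_by xs => xs.length
decreasing_by simpa using Nat.lt_succ_of_le (pvRun_len x xs)

def convert_labels_to_spans_alt (y_pred : List String) : List (Int × Int) :=
  pvBGo 0 y_pred

-- ===== PRECONDITION & SPEC =====
def Spec_convert_labels_to_spans (y_pred : List String) (out : List (Int × Int)) : Prop := out = convert_labels_to_spans_alt y_pred
instance (y_pred : List String) (out : List (Int × Int)) : Decidable (Spec_convert_labels_to_spans y_pred out) := by unfold Spec_convert_labels_to_spans; infer_instance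

-- ===== CLAIM (what is proved, stated in full; the proofs are below) =====
def Claim_equal_convert_labels_to_spans : Prop := ∀ (y_pred : List String), Dom_convert_labels_to_spans y_pred → Spec_convert_labels_to_spans y_pred (convert_labels_to_spans y_pred)

-- ===== LEMMAS AND PROOFS =====

-- A's finalisation step applied to the loop state, with the list length passed through.
def pvFin (pos : Int) (n : Nat) (r : Int × List (Int × Int) × Bool) : List (Int × Int) :=
  if r.2.2 then r.2.1 ++ [(r.1, pos + (n : Int) - 1)] else r.2.1

theorem pvBGo_skip_ne (x : String) (hx : ¬ (x == "1") = true) (pos : Int) (xs : List String) :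
    pvBGo pos (x :: xs) = pvBGo (pos + 1) xs := by
  cases xs with
  | nil => simp [pvBGo, pvRun, hx]
  | cons y ys =>
    by_cases h : (y == x) = true
    · have hyx : y = x := by simpa using h
      subst hyx
      have hy1 : ¬ (y == "1") = true := hx
      simp [pvBGo, pvRun, hy1]
      congr 1
      ring
    · simp [pvBGo, pvRun, h, hx]

theorem pvMain (xs : List String) :
    (∀ (pos : Int) (spans : List (Int × Int)) (s : Int),
      pvFin pos xs.length (pvALoop s spans false pos xs) = spans ++ pvBGo pos xs)
    ∧ (∀ (pos : Int) (spans : List (Int × Int)) (start : Int),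
      pvFin pos xs.length (pvALoop start spans true pos xs) =
        spans ++ (start, pos + ((pvRun "1" xs).1 : Int) - 1) ::
          pvBGo (pos + ((pvRun "1" xs).1 : Int)) (pvRun "1" xs).2) := by
  induction xs with
  | nil =>
    constructor <;> intro pos spans s <;> simp [pvALoop, pvFin, pvBGo, pvRun]
  | cons x xs ih =>
    have hlen : ∀ (pos : Int) r, pvFin pos (x :: xs).length r = pvFin (pos + 1) xs.length r := by
      intro pos r
      simp [pvFin]
      congr 1
      ring_nf
    constructor
    · intro pos spans s
      by_cases hx : (x == "1") = true
      · have hx' : x = "1" := by simpa using hx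
        subst hx'
        rw [show pvALoop s spans false pos ("1" :: xs) = pvALoop pos spans true (pos + 1) xs by
          simp [pvALoop]]
        rw [hlen, ih.2]
        simp [pvBGo]
        constructor <;> ring_nf
      · have hx'' : x ≠ "1" := by simpa using hx
        rw [show pvALoop s spans false pos (x :: xs) = pvALoop s spans false (pos + 1) xs by
          simp [pvALoop, hx'', hx]]
        rw [hlen, ih.1, pvBGo_skip_ne x hx]
    · intro pos spans start
      by_cases hx : (x == "1") = true
      · have hx' : x = "1" := by simpa using hx
        subst hx'
        rw [show pvALoop start spans true pos ("1" :: xs) = pvALoop start spans true (pos + 1) xs by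
          simp [pvALoop]]
        rw [hlen, ih.2]
        simp [pvRun]
        constructor <;> ring_nf
      · have hx'' : x ≠ "1" := by simpa using hx
        rw [show pvALoop start spans true pos (x :: xs) =
            pvALoop start (spans ++ [(start, pos - 1)]) false (pos + 1) xs by
          simp [pvALoop, hx'', hx]]
        rw [hlen, ih.1]
        rw [show (pvRun "1" (x :: xs)) = (0, x :: xs) by simp [pvRun, hx]]
        rw [pvBGo_skip_ne x hx]
        simp

-- ===== VERDICT (by name: the statement is the Claim_ definition above) =====
theorem convert_labels_to_spans_spec : Claim_equal_convert_labels_to_spans := by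
  intro y_pred _
  unfold Spec_convert_labels_to_spans convert_labels_to_spans convert_labels_to_spans_alt
  have h := (pvMain y_pred).1 0 [] 0
  simpa [pvFin] using h
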